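-- pv_equiv track=rewrite | github.com/daniel-reich/ubiquitous-fiesta | 9HWMgvjF7p3zhWBdk_18.py | keys_and_values
-- ===== SOURCE A (Python) =====
-- def keys_and_values(d):
--
--     keys = []
--     val = []
--
--     ans = []
--
--     for k in d:
--         keys.append(k)
--         keys = sorted(keys)
--
--     for i in range(len(keys)):
--         val.append(d.get(keys[i]))
--
--     ans.append(keys)
--     ans.append(val)
--
--     return ans
-- ===== SOURCE B (Python) =====
-- def keys_and_values(d):
--     items = sorted(d.items(), key=lambda kv: kv[0])
--     return [[k for k, _ in items], [v for _, v in items]]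
-- ===== Notes on version B (the rewrite author's own statement) =====
-- stated objective: faster
-- what changed: Sorts the key-value pairs once and splits them by projection, instead of re-sorting the growing key list on every insertion and then re-looking each value up with d.get.
import Mathlib
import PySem

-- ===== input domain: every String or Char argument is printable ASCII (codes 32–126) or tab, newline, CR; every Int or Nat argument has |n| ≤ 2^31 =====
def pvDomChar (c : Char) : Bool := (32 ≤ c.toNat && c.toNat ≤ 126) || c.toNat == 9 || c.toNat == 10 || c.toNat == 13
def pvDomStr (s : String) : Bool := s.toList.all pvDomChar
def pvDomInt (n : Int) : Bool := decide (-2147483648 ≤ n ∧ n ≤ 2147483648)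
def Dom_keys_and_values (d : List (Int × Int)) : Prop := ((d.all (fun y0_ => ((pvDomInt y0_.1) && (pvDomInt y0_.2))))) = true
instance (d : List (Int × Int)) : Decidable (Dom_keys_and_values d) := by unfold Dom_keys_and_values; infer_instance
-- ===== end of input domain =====

-- B sorts the key-value pairs once and splits by projection; A re-sorts the growing
-- key list at each insertion and then looks every value up again (B is faster).

-- ===== PORT A =====
-- d.get(keys[i]) never misses (keys[i] comes from d), so dict.get's None is unreachable;
-- it is ported as getD with default 0, exact on every admitted input.
def keys_and_values (d : List (Int × Int)) : List (List Int) :=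
  let dd := PySem.Dict.ofList d
  let keys : List Int :=
    dd.keys.foldl (fun ks k => PySem.List.sorted (ks ++ [k]) (fun x => x) false) []
  let val : List Int :=
    (PySem.List.pyRange 0 (PySem.List.len keys) 1).foldl
      (fun vs i => vs ++ [PySem.Dict.getD dd (PySem.List.pyGetD keys i 0) 0]) []
  [keys, val]

-- ===== PORT B =====
def keys_and_values_alt (d : List (Int × Int)) : List (List Int) :=
  let items := PySem.List.sorted (PySem.Dict.ofList d).items (fun p => p.1) false
  [items.map (fun p => p.1), items.map (fun p => p.2)]

-- ===== PRECONDITION & SPEC =====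
def Spec_keys_and_values (d : List (Int × Int)) (out : List (List Int)) : Prop := out = keys_and_values_alt d
instance (d : List (Int × Int)) (out : List (List Int)) : Decidable (Spec_keys_and_values d out) := by unfold Spec_keys_and_values; infer_instance

-- ===== CLAIM (what is proved, stated in full; the proofs are below) =====
def Claim_equal_keys_and_values : Prop := ∀ (d : List (Int × Int)), Dom_keys_and_values d → Spec_keys_and_values d (keys_and_values d)

-- ===== LEMMAS AND PROOFS =====

-- A's incremental re-sorting loop yields a permutation of the input that is sorted (≤).
theorem foldlSort_perm_pairwise (l : List Int) (acc : List Int)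
    (h : acc.Pairwise (· ≤ ·)) :
    (l.foldl (fun ks k => PySem.List.sorted (ks ++ [k]) (fun x => x) false) acc).Perm (acc ++ l) ∧
    (l.foldl (fun ks k => PySem.List.sorted (ks ++ [k]) (fun x => x) false) acc).Pairwise (· ≤ ·) := by
  induction l generalizing acc with
  | nil => exact ⟨by simp, h⟩
  | cons k t ih =>
    simp only [List.foldl_cons]
    obtain ⟨hp, hpw⟩ := ih (PySem.List.sorted (acc ++ [k]) (fun x => x) false)
      (by simpa using PySem.List.sorted_pairwise (acc ++ [k]) (fun x => x))
    refine ⟨hp.trans ?_, hpw⟩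
    exact ((PySem.List.sorted_perm (acc ++ [k]) (fun x => x) false).append_right t).trans
      (by simp [List.append_assoc])

theorem keys_and_values_spec : Claim_equal_keys_and_values := by
  unfold Claim_equal_keys_and_values
  intro d _
  unfold Spec_keys_and_values keys_and_values keys_and_values_alt
  simp only []
  set dd := PySem.Dict.ofList d with hdd
  have hnd : dd.keys.Nodup := PySem.Dict.nodup_keys_ofList d
  set I := PySem.List.sorted dd.items (fun p => p.1) false with hI
  -- both key lists equal sorted(dd.keys)
  have hImem : ∀ p ∈ I, p ∈ dd.items := fun p hp => (PySem.List.mem_sorted dd.items (fun p => p.1) false p).mp hp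
  have hIperm : (I.map (fun p => p.1)).Perm dd.keys :=
    (PySem.List.sorted_perm dd.items (fun p => p.1) false).map _
  have hIpw : (I.map (fun p => p.1)).Pairwise (· ≤ ·) :=
    PySem.List.sorted_map_key_pairwise dd.items (fun p => p.1)
  obtain ⟨hKperm, hKpw⟩ := foldlSort_perm_pairwise dd.keys [] (by simp)
  simp only [List.nil_append] at hKperm
  have hKnd : (dd.keys.foldl (fun ks k => PySem.List.sorted (ks ++ [k]) (fun x => x) false) []).Nodup :=
    hKperm.nodup_iff.mpr hnd
  have hKlt : (dd.keys.foldl (fun ks k => PySem.List.sorted (ks ++ [k]) (fun x => x) false) []).Pairwise (· < ·) :=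
    (hKpw.and hKnd).imp (fun h => lt_of_le_of_ne h.1 h.2)
  have hInd : (I.map (fun p => p.1)).Nodup := hIperm.nodup_iff.mpr hnd
  have hIlt : (I.map (fun p => p.1)).Pairwise (· < ·) :=
    (hIpw.and hInd).imp (fun h => lt_of_le_of_ne h.1 h.2)
  have hKeq : dd.keys.foldl (fun ks k => PySem.List.sorted (ks ++ [k]) (fun x => x) false) []
      = I.map (fun p => p.1) :=
    (PySem.List.sorted_eq_of_perm_of_pairwise_lt dd.keys _ (fun x => x) hKperm hKlt).symm.trans
      (PySem.List.sorted_eq_of_perm_of_pairwise_lt dd.keys _ (fun x => x) hIperm hIlt)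
  rw [hKeq]
  -- the value loop is a map over the sorted keys
  have hmap := PySem.List.map_pyGetD_pyRange_zero (I.map (fun p => p.1)) (0 : Int)
  simp only [PySem.List.len] at hmap
  have h2 : (PySem.List.pyRange 0 (((I.map (fun p => p.1)).length : Int)) 1).map
      (fun i => PySem.Dict.getD dd (PySem.List.pyGetD (I.map (fun p => p.1)) i 0) 0)
      = I.map (fun p => p.2) := by
    have hcomp : (PySem.List.pyRange 0 (((I.map (fun p => p.1)).length : Int)) 1).map
        (fun i => PySem.Dict.getD dd (PySem.List.pyGetD (I.map (fun p => p.1)) i 0) 0)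
        = ((PySem.List.pyRange 0 (((I.map (fun p => p.1)).length : Int)) 1).map
            (fun j => PySem.List.pyGetD (I.map (fun p => p.1)) j 0)).map
            (fun k => PySem.Dict.getD dd k 0) := by
      simp [List.map_map, Function.comp_def]
    rw [hcomp, hmap, List.map_map]
    exact List.map_congr_left
      (fun p hp => PySem.Dict.getD_of_mem_items dd (by simpa using hImem p hp) hnd 0)
  rw [PySem.List.foldl_append_singleton_eq_map, List.nil_append]
  simp only [PySem.List.len]
  rw [h2]
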